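-- pv_equiv track=rewrite | github.com/jayeshbhandarkar/LeetCode | 3633_Earliest_Finish_Time_for_Land_and_Water_Rides_I.py | earliestFinishTime
-- ===== SOURCE A (Python) =====
-- def earliestFinishTime(landStartTime, landDuration, waterStartTime, waterDuration):
--     res = float('inf')
--
--     for i in range(len(landStartTime)):
--         for j in range(len(waterStartTime)):
--             landStart = landStartTime[i]
--             landEnd = landStart + landDuration[i]
--             waterStart = max(waterStartTime[j], landEnd)
--             waterEnd = waterStart + waterDuration[j]
--             res = min(res, waterEnd)
--
--             waterStart = waterStartTime[j]
--             waterEnd = waterStart + waterDuration[j]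
--             landStart = max(landStartTime[i], waterEnd)
--             landEnd = landStart + landDuration[i]
--             res = min(res, landEnd)
--
--     return res
-- ===== SOURCE B (Python) =====
-- def earliestFinishTime(landStartTime, landDuration, waterStartTime, waterDuration):
--     minLandEnd = min(landStartTime[i] + landDuration[i] for i in range(len(landStartTime)))
--     minWaterEnd = min(waterStartTime[j] + waterDuration[j] for j in range(len(waterStartTime)))
--     best1 = min(max(waterStartTime[j], minLandEnd) + waterDuration[j] for j in range(len(waterStartTime)))
--     best2 = min(max(landStartTime[i], minWaterEnd) + landDuration[i] for i in range(len(landStartTime)))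
--     return min(best1, best2)
-- ===== Notes on version B (the rewrite author's own statement) =====
-- stated objective: faster
-- what changed: Replaces the nested loop over all land/water pairs by precomputing the minimum land and water end times and doing one linear pass per list (min_i max(c,x_i)=max(c,min_i x_i)).
-- outside the precondition, e.g. on earliestFinishTime([], [], [1], [1]): A returns inf, B raises ValueError; on earliestFinishTime([1, 2], [1], [1], [1]): A raises IndexError, B raises IndexError
import Mathlib
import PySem

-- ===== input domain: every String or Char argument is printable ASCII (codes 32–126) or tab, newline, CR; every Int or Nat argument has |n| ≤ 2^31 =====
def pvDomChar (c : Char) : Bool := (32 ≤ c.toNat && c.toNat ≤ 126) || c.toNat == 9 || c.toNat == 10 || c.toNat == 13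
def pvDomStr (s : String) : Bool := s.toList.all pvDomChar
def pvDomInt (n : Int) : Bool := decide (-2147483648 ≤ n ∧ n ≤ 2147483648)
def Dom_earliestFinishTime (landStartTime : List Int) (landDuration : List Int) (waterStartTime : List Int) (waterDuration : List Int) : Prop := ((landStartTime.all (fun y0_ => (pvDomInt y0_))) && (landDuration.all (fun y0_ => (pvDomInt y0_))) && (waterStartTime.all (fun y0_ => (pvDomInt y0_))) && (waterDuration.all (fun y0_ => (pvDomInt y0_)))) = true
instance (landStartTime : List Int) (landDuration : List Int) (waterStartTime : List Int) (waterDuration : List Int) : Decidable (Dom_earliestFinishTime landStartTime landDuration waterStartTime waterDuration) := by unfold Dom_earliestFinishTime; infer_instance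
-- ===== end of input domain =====

-- B replaces A's O(n*m) nested pair scan by precomputed minimum end times and one linear pass
-- per list (faster, asymptotic change O(n*m) → O(n+m)).

-- ===== PORT A =====
-- res = float('inf'); res = min(res, v): modeled with Option Int, none = the initial inf
-- (Pre_ guarantees both loops run, so the final result is `some`; `.getD 0` only covers the
-- excluded empty case, where Python returns the float inf, not an int).
def pyMinInf (r : Option Int) (v : Int) : Option Int :=
  some (match r with | none => v | some x => min x v)

def earliestFinishTime (landStartTime : List Int) (landDuration : List Int) (waterStartTime : List Int) (waterDuration : List Int) : Int :=
  ((PySem.List.pyRange 0 (PySem.List.len landStartTime) 1).foldl (fun res i =>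
    (PySem.List.pyRange 0 (PySem.List.len waterStartTime) 1).foldl (fun res j =>
      let landStart := PySem.List.pyGetD landStartTime i 0
      let landEnd := landStart + PySem.List.pyGetD landDuration i 0
      let waterStart := max (PySem.List.pyGetD waterStartTime j 0) landEnd
      let waterEnd := waterStart + PySem.List.pyGetD waterDuration j 0
      let res := pyMinInf res waterEnd
      let waterStart2 := PySem.List.pyGetD waterStartTime j 0
      let waterEnd2 := waterStart2 + PySem.List.pyGetD waterDuration j 0
      let landStart2 := max (PySem.List.pyGetD landStartTime i 0) waterEnd2
      let landEnd2 := landStart2 + PySem.List.pyGetD landDuration i 0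
      pyMinInf res landEnd2) res) (none : Option Int)).getD 0

-- ===== PORT B =====
-- Python's min(...) over a generator raises ValueError on an empty sequence; Pre_ excludes
-- that, so `.getD 0` is never the value returned on admitted inputs.
def earliestFinishTime_alt (landStartTime : List Int) (landDuration : List Int) (waterStartTime : List Int) (waterDuration : List Int) : Int :=
  let minLandEnd := (PySem.List.min? ((PySem.List.pyRange 0 (PySem.List.len landStartTime) 1).map
      (fun i => PySem.List.pyGetD landStartTime i 0 + PySem.List.pyGetD landDuration i 0)) (fun y => y)).getD 0
  let minWaterEnd := (PySem.List.min? ((PySem.List.pyRange 0 (PySem.List.len waterStartTime) 1).map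
      (fun j => PySem.List.pyGetD waterStartTime j 0 + PySem.List.pyGetD waterDuration j 0)) (fun y => y)).getD 0
  let best1 := (PySem.List.min? ((PySem.List.pyRange 0 (PySem.List.len waterStartTime) 1).map
      (fun j => max (PySem.List.pyGetD waterStartTime j 0) minLandEnd + PySem.List.pyGetD waterDuration j 0)) (fun y => y)).getD 0
  let best2 := (PySem.List.min? ((PySem.List.pyRange 0 (PySem.List.len landStartTime) 1).map
      (fun i => max (PySem.List.pyGetD landStartTime i 0) minWaterEnd + PySem.List.pyGetD landDuration i 0)) (fun y => y)).getD 0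
  min best1 best2

-- ===== PRECONDITION & SPEC =====
-- Pre_ excludes exactly the inputs where A does not return an int: with an empty start list A
-- returns float('inf') (not an int), and with a duration list shorter than its start list A
-- raises IndexError.  These are the only exclusions.
def Pre_earliestFinishTime (landStartTime : List Int) (landDuration : List Int) (waterStartTime : List Int) (waterDuration : List Int) : Prop :=
  landStartTime ≠ [] ∧ waterStartTime ≠ [] ∧
  landStartTime.length ≤ landDuration.length ∧ waterStartTime.length ≤ waterDuration.length
instance (landStartTime : List Int) (landDuration : List Int) (waterStartTime : List Int) (waterDuration : List Int) : Decidable (Pre_earliestFinishTime landStartTime landDuration waterStartTime waterDuration) := by unfold Pre_earliestFinishTime; infer_instance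

def pvWitness_earliestFinishTime : List Int × List Int × List Int × List Int := ([0], [1], [0], [2])

def Spec_earliestFinishTime (landStartTime : List Int) (landDuration : List Int) (waterStartTime : List Int) (waterDuration : List Int) (out : Int) : Prop := out = earliestFinishTime_alt landStartTime landDuration waterStartTime waterDuration
instance (landStartTime : List Int) (landDuration : List Int) (waterStartTime : List Int) (waterDuration : List Int) (out : Int) : Decidable (Spec_earliestFinishTime landStartTime landDuration waterStartTime waterDuration out) := by unfold Spec_earliestFinishTime; infer_instance

-- ===== CLAIM (what is proved, stated in full; the proofs are below) =====
def Claim_equal_earliestFinishTime : Prop := ∀ (landStartTime : List Int) (landDuration : List Int) (waterStartTime : List Int) (waterDuration : List Int), Dom_earliestFinishTime landStartTime landDuration waterStartTime waterDuration → Pre_earliestFinishTime landStartTime landDuration waterStartTime waterDuration → Spec_earliestFinishTime landStartTime landDuration waterStartTime waterDuration (earliestFinishTime landStartTime landDuration waterStartTime waterDuration)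


-- ===== LEMMAS AND PROOFS =====

-- the two candidate finish times A computes for a (land, water) pair, and their min
def c1f (p q : Int × Int) : Int := max q.1 (p.1 + p.2) + q.2
def c2f (p q : Int × Int) : Int := max p.1 (q.1 + q.2) + p.2
def m1f (p q : Int × Int) : Int := min (c1f p q) (c2f p q)

-- pull the seed out of a running min
lemma fmin_pull (t : List Int) : ∀ (x a : Int), t.foldl min (min x a) = min x (t.foldl min a) := by
  induction t with
  | nil => intro x a; rfl
  | cons y t ih =>
    intro x a
    simp only [List.foldl_cons]
    rw [show min (min x a) y = min x (min a y) by omega, ih]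

-- a running min of a pointwise min splits into the min of two running mins
lemma fmin_split {α : Type} (t : List α) (f g : α → Int) :
    ∀ (a b : Int), (t.map (fun y => min (f y) (g y))).foldl min (min a b)
      = min ((t.map f).foldl min a) ((t.map g).foldl min b) := by
  induction t with
  | nil => intro a b; rfl
  | cons y t ih =>
    intro a b
    simp only [List.map_cons, List.foldl_cons]
    rw [show min (min a b) (min (f y) (g y)) = min (min a (f y)) (min b (g y)) by omega, ih]

-- running min commutes with E ↦ max c E + w
lemma fmin_maxadd {α : Type} (t : List α) (c w : Int) (f : α → Int) :
    ∀ (a : Int), (t.map (fun y => max c (f y) + w)).foldl min (max c a + w)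
      = max c ((t.map f).foldl min a) + w := by
  induction t with
  | nil => intro a; rfl
  | cons y t ih =>
    intro a
    simp only [List.map_cons, List.foldl_cons]
    rw [show min (max c a + w) (max c (f y) + w) = max c (min a (f y)) + w by omega, ih]

-- a min-preserving map commutes with a running min
lemma fmin_hom {α : Type} (g : Int → Int) (hg : ∀ a b, g (min a b) = min (g a) (g b))
    (t : List α) (f : α → Int) :
    ∀ (a : Int), (t.map (fun y => g (f y))).foldl min (g a) = g ((t.map f).foldl min a) := by
  induction t with
  | nil => intro a; rfl
  | cons y t ih =>
    intro a
    simp only [List.map_cons, List.foldl_cons]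
    rw [← hg, ih]

-- A's inner loop, started from `some a`, is a pure running min of m1f
lemma inner_opt_some (p : Int × Int) (W : List (Int × Int)) :
    ∀ (a : Int), W.foldl (fun r q => pyMinInf (pyMinInf r (c1f p q)) (c2f p q)) (some a)
      = some ((W.map (m1f p)).foldl min a) := by
  induction W with
  | nil => intro a; rfl
  | cons q W ih =>
    intro a
    simp only [List.foldl_cons, List.map_cons]
    rw [show pyMinInf (pyMinInf (some a) (c1f p q)) (c2f p q) = some (min a (m1f p q)) by
      simp [pyMinInf, m1f, min_assoc]]
    exact ih (min a (m1f p q))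

-- A's outer loop (with the first inner step exposed), started from `some a`
lemma outer_opt_some (q0 : Int × Int) (W' : List (Int × Int)) (L' : List (Int × Int)) :
    ∀ (a : Int),
      L'.foldl (fun r p => W'.foldl (fun r q => pyMinInf (pyMinInf r (c1f p q)) (c2f p q))
          (pyMinInf (pyMinInf r (c1f p q0)) (c2f p q0))) (some a)
      = some (L'.foldl (fun x p => min x ((W'.map (m1f p)).foldl min (m1f p q0))) a) := by
  induction L' with
  | nil => intro a; rfl
  | cons p L ih =>
    intro a
    simp only [List.foldl_cons]
    rw [show pyMinInf (pyMinInf (some a) (c1f p q0)) (c2f p q0) = some (min a (m1f p q0)) from by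
      simp [pyMinInf, m1f, min_assoc]]
    rw [inner_opt_some p W' (min a (m1f p q0))]
    rw [fmin_pull (W'.map (m1f p)) a (m1f p q0)]
    exact ih (min a ((W'.map (m1f p)).foldl min (m1f p q0)))

-- indexing a list equals the matching projection of indexing its zip
lemma pyGetD_zip_fst (xs ys : List Int) (i : Int) (h0 : 0 ≤ i) (h1 : i < ((xs.zip ys).length : Int)) :
    PySem.List.pyGetD xs i 0 = (PySem.List.pyGetD (xs.zip ys) i ((0 : Int), (0 : Int))).1 := by
  have hx : i < (xs.length : Int) := by
    have := List.length_zip (l₁ := xs) (l₂ := ys); omega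
  rw [PySem.List.pyGetD_eq_getElem xs 0 h0 hx,
      PySem.List.pyGetD_eq_getElem (xs.zip ys) ((0 : Int), (0 : Int)) h0 h1]
  simp [List.getElem_zip]

lemma pyGetD_zip_snd (xs ys : List Int) (i : Int) (h0 : 0 ≤ i) (h1 : i < ((xs.zip ys).length : Int)) :
    PySem.List.pyGetD ys i 0 = (PySem.List.pyGetD (xs.zip ys) i ((0 : Int), (0 : Int))).2 := by
  have hy : i < (ys.length : Int) := by
    have := List.length_zip (l₁ := xs) (l₂ := ys); omega
  rw [PySem.List.pyGetD_eq_getElem ys 0 h0 hy,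
      PySem.List.pyGetD_eq_getElem (xs.zip ys) ((0 : Int), (0 : Int)) h0 h1]
  simp [List.getElem_zip]

-- a comprehension over indices of a list pair is a map over the zipped lists
lemma range_map_pair (xs ys : List Int) (h : xs.length ≤ ys.length) (f : Int × Int → Int) :
    (PySem.List.pyRange 0 (PySem.List.len xs) 1).map
        (fun i => f (PySem.List.pyGetD xs i 0, PySem.List.pyGetD ys i 0))
      = (xs.zip ys).map f := by
  have hLlen : (xs.zip ys).length = xs.length := by rw [List.length_zip]; omega
  have e1 : PySem.List.len xs = PySem.List.len (xs.zip ys) := by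
    rw [PySem.List.len_eq, PySem.List.len_eq, hLlen]
  rw [e1]
  have hc : ∀ i ∈ PySem.List.pyRange 0 (PySem.List.len (xs.zip ys)) 1,
      f (PySem.List.pyGetD xs i 0, PySem.List.pyGetD ys i 0)
        = f (PySem.List.pyGetD (xs.zip ys) i ((0 : Int), (0 : Int))) := by
    intro i hi
    obtain ⟨h0, hlt⟩ := PySem.List.mem_pyRange_one.mp hi
    rw [PySem.List.len_eq] at hlt
    rw [pyGetD_zip_fst xs ys i h0 hlt, pyGetD_zip_snd xs ys i h0 hlt]
  rw [List.map_congr_left hc]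
  have := PySem.List.map_pyGetD_pyRange_zero (xs := xs.zip ys) (d := ((0 : Int), (0 : Int)))
  calc (PySem.List.pyRange 0 (PySem.List.len (xs.zip ys)) 1).map
          (fun i => f (PySem.List.pyGetD (xs.zip ys) i ((0 : Int), (0 : Int))))
      = ((PySem.List.pyRange 0 (PySem.List.len (xs.zip ys)) 1).map
          (fun i => PySem.List.pyGetD (xs.zip ys) i ((0 : Int), (0 : Int)))).map f := by
        rw [List.map_map]; rfl
    _ = (xs.zip ys).map f := by rw [this]

-- A's index loops over the two list pairs become folds over the zipped lists
lemma A_fold_eq (ls ld ws wd : List Int) (h1 : ls.length ≤ ld.length) (h2 : ws.length ≤ wd.length) :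
    ((PySem.List.pyRange 0 (PySem.List.len ls) 1).foldl (fun res i =>
      (PySem.List.pyRange 0 (PySem.List.len ws) 1).foldl (fun res j =>
        pyMinInf (pyMinInf res (max (PySem.List.pyGetD ws j 0) (PySem.List.pyGetD ls i 0 + PySem.List.pyGetD ld i 0) + PySem.List.pyGetD wd j 0))
          (max (PySem.List.pyGetD ls i 0) (PySem.List.pyGetD ws j 0 + PySem.List.pyGetD wd j 0) + PySem.List.pyGetD ld i 0)) res)
      (none : Option Int))
    = (ls.zip ld).foldl (fun r p => (ws.zip wd).foldl
        (fun r q => pyMinInf (pyMinInf r (c1f p q)) (c2f p q)) r) none := by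
  have hLlen : (ls.zip ld).length = ls.length := by rw [List.length_zip]; omega
  have hWlen : (ws.zip wd).length = ws.length := by rw [List.length_zip]; omega
  have e1 : PySem.List.len ls = PySem.List.len (ls.zip ld) := by
    rw [PySem.List.len_eq, PySem.List.len_eq, hLlen]
  have e2 : PySem.List.len ws = PySem.List.len (ws.zip wd) := by
    rw [PySem.List.len_eq, PySem.List.len_eq, hWlen]
  rw [e1]
  rw [PySem.List.foldl_congr_mem (PySem.List.pyRange 0 (PySem.List.len (ls.zip ld)) 1) _
      (fun r i => List.foldl (fun r j =>
          pyMinInf (pyMinInf r (c1f (PySem.List.pyGetD (ls.zip ld) i ((0 : Int), (0 : Int))) (PySem.List.pyGetD (ws.zip wd) j ((0 : Int), (0 : Int)))))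
            (c2f (PySem.List.pyGetD (ls.zip ld) i ((0 : Int), (0 : Int))) (PySem.List.pyGetD (ws.zip wd) j ((0 : Int), (0 : Int))))) r
          (PySem.List.pyRange 0 (PySem.List.len (ws.zip wd)) 1))
      none ?hcong]
  case hcong =>
    intro acc i hi
    obtain ⟨h0, hlt⟩ := PySem.List.mem_pyRange_one.mp hi
    rw [PySem.List.len_eq] at hlt
    rw [e2]
    refine PySem.List.foldl_congr_mem _ _ _ _ ?_
    intro acc' j hj
    obtain ⟨g0, glt⟩ := PySem.List.mem_pyRange_one.mp hj
    rw [PySem.List.len_eq] at glt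
    rw [pyGetD_zip_fst ls ld i h0 hlt, pyGetD_zip_snd ls ld i h0 hlt,
        pyGetD_zip_fst ws wd j g0 glt, pyGetD_zip_snd ws wd j g0 glt]
    rfl
  rw [PySem.List.foldl_pyRange_zero_pyGetD (ls.zip ld) ((0 : Int), (0 : Int))
      (fun r p => List.foldl (fun r j =>
          pyMinInf (pyMinInf r (c1f p (PySem.List.pyGetD (ws.zip wd) j ((0 : Int), (0 : Int)))))
            (c2f p (PySem.List.pyGetD (ws.zip wd) j ((0 : Int), (0 : Int))))) r
          (PySem.List.pyRange 0 (PySem.List.len (ws.zip wd)) 1))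
      none]
  refine PySem.List.foldl_congr_mem _ _ _ _ ?_
  intro acc p _
  exact PySem.List.foldl_pyRange_zero_pyGetD (ws.zip wd) ((0 : Int), (0 : Int))
    (fun r q => pyMinInf (pyMinInf r (c1f p q)) (c2f p q)) acc

-- B's first linear pass, as a function of the candidate minimum land end time
def g1f (W' : List (Int × Int)) (q0 : Int × Int) (E : Int) : Int :=
  (W'.map (fun q => max q.1 E + q.2)).foldl min (max q0.1 E + q0.2)

lemma g1f_min (W' : List (Int × Int)) (q0 : Int × Int) (a b : Int) :
    g1f W' q0 (min a b) = min (g1f W' q0 a) (g1f W' q0 b) := by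
  unfold g1f
  rw [show (fun q : Int × Int => max q.1 (min a b) + q.2)
        = (fun q : Int × Int => min (max q.1 a + q.2) (max q.1 b + q.2)) from
      funext (fun q => by omega),
    show max q0.1 (min a b) + q0.2 = min (max q0.1 a + q0.2) (max q0.1 b + q0.2) by omega]
  exact fmin_split W' _ _ _ _

-- turn an accumulator loop over min into a running min over the mapped list
lemma fold_min_map {α : Type} (t : List α) (f : α → Int) (a : Int) :
    t.foldl (fun x p => min x (f p)) a = (t.map f).foldl min a :=
  (List.foldl_map).symm

-- the core algebraic identity: the nested running min over all pairs equals B's two linear passes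
lemma key (L' W' : List (Int × Int)) (p0 q0 : Int × Int) :
    (L'.map (fun p => (W'.map (m1f p)).foldl min (m1f p q0))).foldl min
        ((W'.map (m1f p0)).foldl min (m1f p0 q0))
    = min ((W'.map (fun q => max q.1 ((L'.map (fun p => p.1 + p.2)).foldl min (p0.1 + p0.2)) + q.2)).foldl min
              (max q0.1 ((L'.map (fun p => p.1 + p.2)).foldl min (p0.1 + p0.2)) + q0.2))
          ((L'.map (fun p => max p.1 ((W'.map (fun q => q.1 + q.2)).foldl min (q0.1 + q0.2)) + p.2)).foldl min
              (max p0.1 ((W'.map (fun q => q.1 + q.2)).foldl min (q0.1 + q0.2)) + p0.2)) := by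
  have hsplitW : ∀ p : Int × Int, (W'.map (m1f p)).foldl min (m1f p q0)
      = min ((W'.map (c1f p)).foldl min (c1f p q0)) ((W'.map (c2f p)).foldl min (c2f p q0)) :=
    fun p => fmin_split W' (c1f p) (c2f p) (c1f p q0) (c2f p q0)
  simp only [hsplitW]
  rw [fmin_split L' (fun p => (W'.map (c1f p)).foldl min (c1f p q0))
      (fun p => (W'.map (c2f p)).foldl min (c2f p q0))]
  have hC2 : ∀ p : Int × Int, (W'.map (c2f p)).foldl min (c2f p q0)
      = max p.1 ((W'.map (fun q => q.1 + q.2)).foldl min (q0.1 + q0.2)) + p.2 :=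
    fun p => fmin_maxadd W' p.1 p.2 (fun q => q.1 + q.2) (q0.1 + q0.2)
  have hC1 : ∀ p : Int × Int, (W'.map (c1f p)).foldl min (c1f p q0) = g1f W' q0 (p.1 + p.2) :=
    fun p => rfl
  simp only [hC1, hC2]
  congr 1
  exact fmin_hom (g1f W' q0) (g1f_min W' q0) L' (fun p => p.1 + p.2) (p0.1 + p0.2)

-- ===== VERDICT (by name: the statement is the Claim_ definition above) =====
theorem earliestFinishTime_spec : Claim_equal_earliestFinishTime := by
  intro ls ld ws wd _ hpre
  obtain ⟨hls, hws, h1, h2⟩ := hpre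
  unfold Spec_earliestFinishTime
  rcases ls with _ | ⟨a, ls'⟩
  · exact absurd rfl hls
  rcases ws with _ | ⟨c, ws'⟩
  · exact absurd rfl hws
  rcases ld with _ | ⟨b, ld'⟩
  · simp at h1
  rcases wd with _ | ⟨dd, wd'⟩
  · simp at h2
  simp only [earliestFinishTime, earliestFinishTime_alt]
  rw [A_fold_eq _ _ _ _ h1 h2]
  rw [range_map_pair (a :: ls') (b :: ld') h1 (fun p => p.1 + p.2),
      range_map_pair (c :: ws') (dd :: wd') h2 (fun q => q.1 + q.2)]
  rw [range_map_pair (c :: ws') (dd :: wd') h2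
      (fun q => max q.1 ((PySem.List.min? (((a :: ls').zip (b :: ld')).map (fun p => p.1 + p.2)) (fun y => y)).getD 0) + q.2),
      range_map_pair (a :: ls') (b :: ld') h1
      (fun p => max p.1 ((PySem.List.min? (((c :: ws').zip (dd :: wd')).map (fun q => q.1 + q.2)) (fun y => y)).getD 0) + p.2)]
  simp only [List.zip_cons_cons, List.foldl_cons, List.map_cons]
  rw [show pyMinInf (pyMinInf none (c1f (a, b) (c, dd))) (c2f (a, b) (c, dd))
        = some (m1f (a, b) (c, dd)) from by simp [pyMinInf, m1f]]
  rw [inner_opt_some (a, b) (ws'.zip wd') (m1f (a, b) (c, dd))]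
  rw [outer_opt_some (c, dd) (ws'.zip wd') (ls'.zip ld')
      (((ws'.zip wd').map (m1f (a, b))).foldl min (m1f (a, b) (c, dd)))]
  simp only [Option.getD_some]
  rw [fold_min_map (ls'.zip ld')
      (fun p => ((ws'.zip wd').map (m1f p)).foldl min (m1f p (c, dd)))
      (((ws'.zip wd').map (m1f (a, b))).foldl min (m1f (a, b) (c, dd)))]
  rw [PySem.List.min?_id_cons, PySem.List.min?_id_cons, PySem.List.min?_id_cons,
      PySem.List.min?_id_cons]
  simp only [Option.getD_some]
  exact key (ls'.zip ld') (ws'.zip wd') (a, b) (c, dd)
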